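-- pv_equiv track=rewrite | github.com/scnsh/CompetitiveProgramming | Atcorder/GrandContest034/myans/b.py | solve
-- ===== SOURCE A (Python) =====
-- def solve(s):
--   ans = tmp = 0
--   for char in s:
--     if char == "A":
--       tmp += 1
--     else:
--       ans += tmp
--   return ans
-- ===== SOURCE B (Python) =====
-- def solve(s):
--   pos = [i for i, c in enumerate(s) if c == "A"]
--   m = len(pos)
--   return m * (len(s) - 1) - sum(pos) - m * (m - 1) // 2
-- ===== Notes on version B (the rewrite author's own statement) =====
-- stated objective: alternative
-- what changed: B replaces A's running-accumulator loop by position arithmetic: it collects the indices of the 'A's and computes the pair count with the closed form m*(len(s)-1) - sum(pos) - m*(m-1)//2, correct because the 'A' at position p is followed by len(s)-1-p characters of which the later A's (m-1-k of them) must be subtracted.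
import Mathlib
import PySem

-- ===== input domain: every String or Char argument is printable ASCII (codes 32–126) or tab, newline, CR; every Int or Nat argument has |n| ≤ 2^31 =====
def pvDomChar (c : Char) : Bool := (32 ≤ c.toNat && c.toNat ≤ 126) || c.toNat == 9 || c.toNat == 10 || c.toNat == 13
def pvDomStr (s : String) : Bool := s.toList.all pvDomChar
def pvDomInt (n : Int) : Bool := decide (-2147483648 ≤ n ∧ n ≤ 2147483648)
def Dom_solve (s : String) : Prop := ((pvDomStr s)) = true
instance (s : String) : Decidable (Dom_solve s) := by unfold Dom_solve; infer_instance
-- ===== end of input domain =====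

-- B replaces A's running-accumulator loop with position arithmetic over the list of 'A' indices
-- (closed form m*(len-1) - sum(pos) - m*(m-1)//2); same value, alternative algorithm.

-- ===== PORT A =====
-- forward pass: state (ans, tmp); 'A' increments tmp, otherwise ans += tmp
def solve (s : String) : Int :=
  (s.toList.foldl
    (fun st c => if c = 'A' then (st.1, st.2 + 1) else (st.1 + st.2, st.2))
    ((0 : Int), (0 : Int))).1

-- ===== PORT B =====
-- pos = indices of 'A's (enumerate + filter), then the closed form with Python floor division
def solve_alt (s : String) : Int :=
  let pos : List Int :=
    ((PySem.List.enumerate s.toList).filter (fun p => p.2 = 'A')).map (fun p => p.1)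
  let m : Int := pos.length
  m * ((s.toList.length : Int) - 1) - pos.sum - PySem.Int.floordiv (m * (m - 1)) 2

-- ===== PRECONDITION & SPEC =====
def Spec_solve (s : String) (out : Int) : Prop := out = solve_alt s
instance (s : String) (out : Int) : Decidable (Spec_solve s out) := by unfold Spec_solve; infer_instance

-- ===== CLAIM (what is proved, stated in full; the proofs are below) =====
def Claim_equal_solve : Prop := ∀ (s : String), Dom_solve s → Spec_solve s (solve s)

-- ===== LEMMAS AND PROOFS =====

def pvStepA : Int × Int → Char → Int × Int :=
  fun st c => if c = 'A' then (st.1, st.2 + 1) else (st.1 + st.2, st.2)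

def pvCntA : List Char → Int
  | [] => 0
  | c :: cs => (if c = 'A' then 1 else 0) + pvCntA cs

def pvCntN : List Char → Int
  | [] => 0
  | c :: cs => (if c = 'A' then 0 else 1) + pvCntN cs

-- sum of the 0-based positions of the 'A's
def pvSumPos : List Char → Int
  | [] => 0
  | _ :: cs => pvCntA cs + pvSumPos cs

theorem pvLenEq (l : List Char) : (l.length : Int) = pvCntA l + pvCntN l := by
  induction l with
  | nil => simp [pvCntA, pvCntN]
  | cons c cs ih =>
    simp only [List.length_cons, pvCntA, pvCntN]
    push_cast
    by_cases h : c = 'A' <;> simp [h] <;> omega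

theorem pvInvA (l : List Char) : ∀ (a t : Int),
    l.foldl pvStepA (a, t) = (a + t * pvCntN l + (l.foldl pvStepA (0, 0)).1, t + pvCntA l) := by
  induction l with
  | nil => intro a t; simp [pvCntA, pvCntN]
  | cons c cs ih =>
    intro a t
    by_cases h : c = 'A'
    · simp only [List.foldl_cons, pvStepA, pvCntA, pvCntN, h, ite_true]
      rw [ih a (t + 1), ih 0 (0 + 1), Prod.mk.injEq]
      constructor <;> ring
    · simp only [List.foldl_cons, pvStepA, pvCntA, pvCntN, h, ite_false]
      rw [ih (a + t) t, Prod.mk.injEq]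
      constructor <;> ring

-- the doubled closed form avoids the division
theorem pvClosed (l : List Char) :
    2 * (l.foldl pvStepA (0, 0)).1
      = 2 * pvCntA l * ((l.length : Int) - 1) - 2 * pvSumPos l - pvCntA l * (pvCntA l - 1) := by
  induction l with
  | nil => simp [pvCntA, pvSumPos]
  | cons c cs ih =>
    have hlen := pvLenEq cs
    by_cases h : c = 'A'
    · simp only [List.foldl_cons, pvStepA, h, ite_true, pvCntA, pvSumPos, List.length_cons]
      rw [pvInvA cs 0 (0 + 1)]
      push_cast
      nlinarith [ih]
    · simp only [List.foldl_cons, pvStepA, h, ite_false, pvCntA, pvSumPos, List.length_cons]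
      rw [pvInvA cs (0 + 0) 0]
      push_cast
      nlinarith [ih]

-- enumerate/filter/map components of solve_alt, expressed via the recursive helpers
theorem pvPosChar (l : List Char) : ∀ (k : Int),
    (((PySem.List.enumerate l k).filter (fun p => p.2 = 'A')).map (fun p => p.1)).length
        = pvCntA l
    ∧ (((PySem.List.enumerate l k).filter (fun p => p.2 = 'A')).map (fun p => p.1)).sum
        = k * pvCntA l + pvSumPos l := by
  induction l with
  | nil => intro k; simp [PySem.List.enumerate_nil, pvCntA, pvSumPos]
  | cons c cs ih =>
    intro k
    obtain ⟨ihl, ihs⟩ := ih (k + 1)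
    by_cases h : c = 'A'
    · simp only [PySem.List.enumerate_cons, List.filter_cons, h, decide_true, ite_true,
        List.map_cons, List.length_cons, List.sum_cons, pvCntA, pvSumPos, ihs, ite_true]
      constructor
      · push_cast; omega
      · ring
    · rw [PySem.List.enumerate_cons, List.filter_cons, if_neg (by simp [h])]
      simp only [pvCntA, pvSumPos, h, ite_false]
      exact ⟨by rw [ihl]; ring, by rw [ihs]; ring⟩

-- ===== VERDICT (by name: the statement is the Claim_ definition above) =====
theorem solve_spec : Claim_equal_solve := by
  intro s _
  unfold Spec_solve solve solve_alt
  obtain ⟨hl, hs⟩ := pvPosChar s.toList 0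
  obtain ⟨k, hk⟩ := Int.even_mul_succ_self (pvCntA s.toList - 1)
  have h2k : pvCntA s.toList * (pvCntA s.toList - 1) = 2 * k := by nlinarith [hk]
  have hfd : PySem.Int.floordiv (pvCntA s.toList * (pvCntA s.toList - 1)) 2 = k := by
    rw [PySem.Int.floordiv_eq_ediv_of_pos (by norm_num), h2k]
    exact Int.mul_ediv_cancel_left k (by norm_num)
  have hc := pvClosed s.toList
  simp only [hl, hs, hfd]
  have hdef : (List.foldl (fun st c => if c = 'A' then (st.1, st.2 + 1) else (st.1 + st.2, st.2))
      ((0 : Int), (0 : Int)) s.toList) = List.foldl pvStepA (0, 0) s.toList := rfl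
  rw [hdef]
  nlinarith [hc, h2k]
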